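-- pv_equiv track=rewrite | github.com/matajoh/bocpy | examples/prime_factor.py | _merge_sieve
-- ===== SOURCE A (Python) =====
-- def _merge_sieve(existing, new_primes):
--     """Extend *existing* with the tail of *new_primes* beyond its end.
--
--     Because the sieve is built by extending upward, *new_primes* is a
--     sorted run of consecutive primes that is either:
--     1. entirely contained in *existing* (another lane already found them),
--     2. overlapping the end (the prefix is known, the suffix is new), or
--     3. strictly continuing *existing* (all new).
--     In every case we just need to append the primes past *existing*[-1].
--     """
--     if not new_primes:
--         return existing
--     if not existing:
--         return new_primes
--
--     cutoff = existing[-1]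
--     # Binary search for the first new prime beyond the existing sieve
--     lo, hi = 0, len(new_primes)
--     while lo < hi:
--         mid = (lo + hi) // 2
--         if new_primes[mid] <= cutoff:
--             lo = mid + 1
--         else:
--             hi = mid
--
--     if lo >= len(new_primes):
--         return existing
--     return existing + new_primes[lo:]
-- ===== SOURCE B (Python) =====
-- def _merge_sieve(existing, new_primes):
--     if not new_primes:
--         return existing
--     if not existing:
--         return new_primes
--     cutoff = existing[-1]
--
--     def beyond(run):
--         # divide and conquer: the part of *run* that A's bisection keeps,
--         # assembled directly by concatenation
--         if not run:
--             return []
--         mid = len(run) // 2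
--         if run[mid] <= cutoff:
--             return beyond(run[mid + 1:])
--         return beyond(run[:mid]) + run[mid:]
--
--     return existing + beyond(new_primes)
-- ===== Notes on version B (the rewrite author's own statement) =====
-- stated objective: alternative
-- what changed: Replaces the index-bookkeeping while-loop (lo/hi binary search) plus final slice by a divide-and-conquer structural recursion on sublists that assembles the appended tail directly by concatenation; equal on every input because the midpoint offset depends only on the window length.
import Mathlib
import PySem

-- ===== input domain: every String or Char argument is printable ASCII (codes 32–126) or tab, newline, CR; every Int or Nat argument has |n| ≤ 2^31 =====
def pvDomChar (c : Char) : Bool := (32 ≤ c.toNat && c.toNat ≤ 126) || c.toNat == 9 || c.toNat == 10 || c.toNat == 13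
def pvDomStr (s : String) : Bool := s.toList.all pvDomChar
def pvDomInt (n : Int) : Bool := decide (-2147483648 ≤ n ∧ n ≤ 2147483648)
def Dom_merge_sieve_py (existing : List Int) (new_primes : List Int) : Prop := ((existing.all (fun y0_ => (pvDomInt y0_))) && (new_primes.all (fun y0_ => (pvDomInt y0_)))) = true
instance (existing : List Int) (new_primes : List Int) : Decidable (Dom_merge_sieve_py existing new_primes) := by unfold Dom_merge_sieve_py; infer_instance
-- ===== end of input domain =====

-- B replaces A's lo/hi binary-search loop + slice by a divide-and-conquer recursion on
-- sublists assembling the appended tail by concatenation (alternative decomposition, same values).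


-- ===== PORT A =====
-- the 'while lo < hi' binary-search loop; the index mid is always in range
-- (0 ≤ lo ≤ mid < hi ≤ len), so the `getD 0` default is never used
def pvBs (xs : List Int) (cutoff : Int) (lo hi : Int) : Int :=
  if _h : lo < hi then
    let mid := PySem.Int.floordiv (lo + hi) 2
    if (PySem.List.pyGet? xs mid).getD 0 ≤ cutoff then
      pvBs xs cutoff (mid + 1) hi
    else
      pvBs xs cutoff lo mid
  else lo
termination_by (hi - lo).toNat
decreasing_by
  all_goals
    have h1 := PySem.Int.floordiv_two_mid_bounds (le_of_lt _h)
    have h2 : PySem.Int.floordiv (lo + hi) 2 < hi := by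
      rw [PySem.Int.floordiv_lt_iff_lt_mul (by omega)]; omega
    have h3 : lo ≤ PySem.Int.floordiv (lo + hi) 2 := by
      rw [PySem.Int.le_floordiv_iff_mul_le (by omega)]; omega
    omega

def merge_sieve_py (existing : List Int) (new_primes : List Int) : List Int :=
  if new_primes = [] then existing
  else if existing = [] then new_primes
  else
    -- existing[-1]; existing ≠ [], so the `getD 0` default is never used
    let cutoff := (PySem.List.pyGet? existing (-1)).getD 0
    let lo := pvBs new_primes cutoff 0 (new_primes.length : Int)
    if (new_primes.length : Int) ≤ lo then existing
    else existing ++ PySem.List.slice new_primes (some lo) none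

-- ===== PORT B =====
-- index/termination facts for `beyond`, cited by name in the definition
theorem pvMidLt (run : List Int) (h : run ≠ []) : run.length / 2 < run.length := by
  have := List.length_pos_of_ne_nil h; omega

theorem pvDropLt (run : List Int) (h : run ≠ []) :
    (run.drop (run.length / 2 + 1)).length < run.length := by
  have := List.length_pos_of_ne_nil h; simp [List.length_drop]; omega

theorem pvTakeLt (run : List Int) (h : run ≠ []) :
    (run.take (run.length / 2)).length < run.length := by
  have := List.length_pos_of_ne_nil h; simp [List.length_take]; omega

-- `beyond`: Python's run[mid] is in range (run ≠ [], mid = len//2 < len); the slices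
-- run[mid+1:], run[:mid], run[mid:] are drop/take (exact for these nonnegative bounds,
-- PySem.List.slice_from_natCast / slice_to_natCast); len(run)//2 on a Nat is Nat division
def pvBeyond (run : List Int) (cutoff : Int) : List Int :=
  if h : run = [] then []
  else
    let mid := run.length / 2
    if run[mid]'(pvMidLt run h) ≤ cutoff then
      pvBeyond (run.drop (mid + 1)) cutoff
    else
      pvBeyond (run.take mid) cutoff ++ run.drop mid
termination_by run.length
decreasing_by
  · exact pvDropLt run h
  · exact pvTakeLt run h

def merge_sieve_py_alt (existing : List Int) (new_primes : List Int) : List Int :=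
  if new_primes = [] then existing
  else if h : existing = [] then new_primes
  else
    let cutoff := existing.getLast h
    existing ++ pvBeyond new_primes cutoff

-- ===== PRECONDITION & SPEC =====
def Spec_merge_sieve_py (existing : List Int) (new_primes : List Int) (out : List Int) : Prop := out = merge_sieve_py_alt existing new_primes
instance (existing : List Int) (new_primes : List Int) (out : List Int) : Decidable (Spec_merge_sieve_py existing new_primes out) := by unfold Spec_merge_sieve_py; infer_instance

-- ===== CLAIM (what is proved, stated in full; the proofs are below) =====
def Claim_equal_merge_sieve_py : Prop := ∀ (existing : List Int) (new_primes : List Int), Dom_merge_sieve_py existing new_primes → Spec_merge_sieve_py existing new_primes (merge_sieve_py existing new_primes)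

-- ===== LEMMAS AND PROOFS =====

-- unfolding of one loop iteration of A's search (zeta-reduced)
theorem pvBs_step (xs : List Int) (c lo hi : Int) (h : lo < hi) :
    pvBs xs c lo hi =
      if (PySem.List.pyGet? xs (PySem.Int.floordiv (lo + hi) 2)).getD 0 ≤ c then
        pvBs xs c (PySem.Int.floordiv (lo + hi) 2 + 1) hi
      else pvBs xs c lo (PySem.Int.floordiv (lo + hi) 2) := by
  rw [pvBs]; simp only [dif_pos h]

-- the search result stays within its window
theorem pvBs_bounds (xs : List Int) (c : Int) (lo hi : Int) (hle : lo ≤ hi) :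
    lo ≤ pvBs xs c lo hi ∧ pvBs xs c lo hi ≤ hi := by
  by_cases h : lo < hi
  · have hm := PySem.Int.floordiv_two_mid_bounds (le_of_lt h)
    set mid := PySem.Int.floordiv (lo + hi) 2 with hmid
    have hmlt : mid < hi := by
      rw [hmid, PySem.Int.floordiv_lt_iff_lt_mul (by omega)]; omega
    rw [pvBs_step xs c lo hi h, ← hmid]
    by_cases hv : (PySem.List.pyGet? xs mid).getD 0 ≤ c
    · rw [if_pos hv]
      have := pvBs_bounds xs c (mid + 1) hi (by omega)
      constructor <;> omega
    · rw [if_neg hv]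
      have := pvBs_bounds xs c lo mid (by omega)
      constructor <;> omega
  · rw [pvBs, dif_neg h]; omega
termination_by (hi - lo).toNat
decreasing_by all_goals omega

-- KEY: on the window xs[lo:hi], B's divide-and-conquer assembles exactly the suffix of xs
-- that starts at A's binary-search index (the midpoint offset (lo+hi)//2 - lo depends only
-- on the window length hi - lo, so the two searches probe the same elements)
theorem pvBeyond_window (xs : List Int) (c : Int) (k : Nat) :
    ∀ (lo hi : Int), 0 ≤ lo → lo ≤ hi → hi ≤ (xs.length : Int) → (hi - lo).toNat = k →
    pvBeyond ((xs.drop lo.toNat).take (hi - lo).toNat) c ++ xs.drop hi.toNat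
      = xs.drop (pvBs xs c lo hi).toNat := by
  induction k using Nat.strong_induction_on with
  | _ k IH =>
  intro lo hi hlo hle hhi hk
  by_cases h : lo < hi
  · -- window data
    set a := lo.toNat with ha
    set b := hi.toNat with hb
    have hab : a < b := by omega
    have hbl : b ≤ xs.length := by omega
    set w := (xs.drop a).take (b - a) with hw
    have hwl : w.length = b - a := by
      rw [hw]; simp [List.length_take, List.length_drop]; omega
    have hwne : w ≠ [] := by
      intro h0; rw [h0] at hwl; simp at hwl; omega
    -- A's midpoint and B's midpoint coincide
    have hm := PySem.Int.floordiv_two_mid_bounds (le_of_lt h)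
    set mid := PySem.Int.floordiv (lo + hi) 2 with hmid
    have hmlt : mid < hi := by
      rw [hmid, PySem.Int.floordiv_lt_iff_lt_mul (by omega)]; omega
    have hmnn : 0 ≤ mid := by omega
    have hmval : mid = ((a + (b - a) / 2 : Nat) : Int) := by
      have h3 : PySem.Int.floordiv ((a + b : Nat) : Int) 2 = (((a + b) / 2 : Nat) : Int) := by
        exact_mod_cast PySem.Int.floordiv_natCast (a + b) 2
      have h4 : (a + b) / 2 = a + (b - a) / 2 := by omega
      rw [hmid, show lo + hi = ((a + b : Nat) : Int) by omega, h3, h4]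
    have hmw : w.length / 2 = (b - a) / 2 := by rw [hwl]
    have hmidx : a + (b - a) / 2 < xs.length := by omega
    -- the probed element is the same on both sides
    have hiw : w.length / 2 < w.length := by
      have := List.length_pos_of_ne_nil hwne; omega
    have hwelem : w[w.length / 2]'hiw = xs[a + (b - a) / 2]'hmidx := by
      have hq : w[w.length / 2]? = xs[a + (b - a) / 2]? := by
        rw [hwl, hw, List.getElem?_take_of_lt (by omega), List.getElem?_drop]
      rw [List.getElem?_eq_getElem hiw, List.getElem?_eq_getElem hmidx] at hq
      exact Option.some.inj hq
    have hgetA : (PySem.List.pyGet? xs mid).getD 0 = xs[a + (b - a) / 2]'hmidx := by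
      have ht : mid.toNat = a + (b - a) / 2 := by omega
      rw [PySem.List.pyGet?_of_nonneg xs hmnn, ht]
      simp [List.getElem?_eq_getElem hmidx]
    -- rewrite the window in terms of w, unfold one step of B
    have hba : (hi - lo).toNat = b - a := by omega
    rw [hba, ← hw]
    rw [pvBeyond]
    simp only [dif_neg hwne]
    rw [pvBs_step xs c lo hi h, ← hmid, hgetA]
    by_cases hv : w[w.length / 2]'hiw ≤ c
    · have hv' : xs[a + (b - a) / 2]'hmidx ≤ c := hwelem ▸ hv
      rw [if_pos hv, if_pos hv']
      -- w[mid_w+1:] is the window xs[mid+1:hi]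
      have hdw : w.drop (w.length / 2 + 1) = (xs.drop (mid + 1).toNat).take (hi - (mid + 1)).toNat := by
        have hm1 : (mid + 1).toNat = a + ((b - a) / 2 + 1) := by omega
        have hm2 : (hi - (mid + 1)).toNat = (b - a) - ((b - a) / 2 + 1) := by omega
        rw [hm1, hm2, hmw, hw, List.drop_take, List.drop_drop]
      rw [hdw]
      exact IH (hi - (mid + 1)).toNat (by omega) (mid + 1) hi (by omega) (by omega) hhi rfl
    · have hv' : ¬ xs[a + (b - a) / 2]'hmidx ≤ c := hwelem ▸ hv
      rw [if_neg hv, if_neg hv']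
      -- w[:mid_w] is the window xs[lo:mid], and w[mid_w:] ++ xs[hi:] = xs[mid:]
      have htw : w.take (w.length / 2) = (xs.drop lo.toNat).take (mid - lo).toNat := by
        have hm3 : (mid - lo).toNat = (b - a) / 2 := by omega
        rw [hm3, hmw, hw, List.take_take, Nat.min_eq_left (by omega)]
      have hdw : w.drop (w.length / 2) ++ xs.drop hi.toNat = xs.drop mid.toNat := by
        have h1 : mid.toNat = a + (b - a) / 2 := by omega
        rw [hmw, hw, List.drop_take, List.drop_drop, h1]
        have h4 : xs.drop b = (xs.drop (a + (b - a) / 2)).drop ((b - a) - (b - a) / 2) := by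
          rw [List.drop_drop]; congr 1; omega
        rw [h4]
        exact List.take_append_drop _ _
      rw [List.append_assoc, hdw, htw]
      exact IH (mid - lo).toNat (by omega) lo mid (by omega) (by omega) (by omega) rfl
  · have heq : lo = hi := by omega
    have hwnil : (xs.drop lo.toNat).take (hi - lo).toNat = [] := by
      simp [heq]
    rw [hwnil, pvBeyond, dif_pos rfl, List.nil_append, pvBs, dif_neg h, heq]

-- specialisation to the whole list
theorem pvBeyond_eq_drop (xs : List Int) (c : Int) :
    pvBeyond xs c = xs.drop (pvBs xs c 0 (xs.length : Int)).toNat := by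
  have := pvBeyond_window xs c ((xs.length : Int) - 0).toNat 0 (xs.length : Int)
    (le_refl 0) (by omega) (le_refl _) rfl
  simpa using this

-- ===== VERDICT (by name: the statement is the Claim_ definition above) =====
theorem merge_sieve_py_spec : Claim_equal_merge_sieve_py := by
  intro existing new_primes _hdom
  unfold Spec_merge_sieve_py
  by_cases hn : new_primes = []
  · simp [merge_sieve_py, merge_sieve_py_alt, hn]
  · by_cases he : existing = []
    · simp [merge_sieve_py, merge_sieve_py_alt, hn, he]
    · rw [merge_sieve_py, merge_sieve_py_alt]
      simp only [if_neg hn, if_neg he, dif_neg he]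
      have hcut : (PySem.List.pyGet? existing (-1)).getD 0 = existing.getLast he := by
        rw [PySem.List.pyGet?_neg_one, List.getLast?_eq_some_getLast he]
        rfl
      rw [hcut]
      set c := existing.getLast he with hc
      have hfd := pvBeyond_eq_drop new_primes c
      obtain ⟨h0, hlen⟩ := pvBs_bounds new_primes c 0 (new_primes.length : Int) (by omega)
      by_cases hge : (new_primes.length : Int) ≤ pvBs new_primes c 0 (new_primes.length : Int)
      · rw [if_pos hge]
        have : pvBeyond new_primes c = [] := by
          rw [hfd, List.drop_eq_nil_iff]
          omega
        rw [this, List.append_nil]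
      · rw [if_neg hge]
        rw [PySem.List.slice_from _ h0, hfd]
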